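-- pv_equiv track=rewrite | github.com/theGergi/AlgebraForSecurity1 | solve.py | bigger_than
-- ===== SOURCE A (Python) =====
-- def bigger_than(x, y):
--     while(len(x) != len(y)):
--         if len(x) > len(y):
--             y = [0] + y
--         else:
--             x = [0] + x
--
--     for i in range(len(x)):
--         if y[i]>x[i]:
--             return False
--         if x[i]>y[i]:
--             return True
-- ===== SOURCE B (Python) =====
-- def bigger_than(x, y):
--     res = None
--     # scan least-significant position first; a later (more significant) difference overwrites
--     for k in range(max(len(x), len(y))):
--         a = x[len(x) - 1 - k] if k < len(x) else 0
--         b = y[len(y) - 1 - k] if k < len(y) else 0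
--         if a > b:
--             res = True
--         elif a < b:
--             res = False
--     return res
-- ===== Notes on version B (the rewrite author's own statement) =====
-- stated objective: alternative
-- what changed: A pads the shorter list by repeatedly prepending zeros and then scans left-to-right with early returns; B never builds a list and never exits early: one right-to-left (least-significant-first) pass over the aligned positions, reading missing positions as 0 and overwriting an accumulator on each differing digit, so the last overwrite (the most significant difference) decides.
import Mathlib
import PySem

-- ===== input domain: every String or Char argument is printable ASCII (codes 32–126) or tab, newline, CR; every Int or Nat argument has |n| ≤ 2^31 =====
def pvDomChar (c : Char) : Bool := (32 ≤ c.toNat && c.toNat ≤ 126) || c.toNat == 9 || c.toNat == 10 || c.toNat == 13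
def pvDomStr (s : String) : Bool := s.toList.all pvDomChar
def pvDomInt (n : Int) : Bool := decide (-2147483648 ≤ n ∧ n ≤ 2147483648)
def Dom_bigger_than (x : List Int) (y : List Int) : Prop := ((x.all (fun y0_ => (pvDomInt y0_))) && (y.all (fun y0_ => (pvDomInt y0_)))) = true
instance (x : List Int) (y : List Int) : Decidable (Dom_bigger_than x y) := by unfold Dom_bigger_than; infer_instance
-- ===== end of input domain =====

-- B replaces A's pad-then-scan-left-to-right-with-early-return by a single right-to-left
-- (least-significant-first) pass that overwrites an accumulator on each differing position,
-- reading missing positions of the shorter list as 0 (objective: alternative).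

-- ===== PORT A =====
-- the while-loop: prepend 0 to the shorter list until the lengths agree
def pyPad (x : List Int) (y : List Int) : List Int × List Int :=
  if x.length ≠ y.length then
    if x.length > y.length then pyPad x (0 :: y) else pyPad (0 :: x) y
  else (x, y)
termination_by (x.length - y.length) + (y.length - x.length)
decreasing_by all_goals simp_all; omega

-- the for-loop over equal-length lists, indexing in lockstep
def pyCmp : List Int → List Int → Option Bool
  | a :: as, b :: bs =>
      if b > a then some false else if a > b then some true else pyCmp as bs
  | _, _ => none

def bigger_than (x : List Int) (y : List Int) : Option Bool :=
  let p := pyPad x y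
  pyCmp p.1 p.2

-- ===== PORT B =====
-- single fold over range(max(len x, len y)); indices k < len are in range, so getD is exact
def bigger_than_alt (x : List Int) (y : List Int) : Option Bool :=
  (List.range (max x.length y.length)).foldl
    (fun res k =>
      let a := if k < x.length then x.getD (x.length - 1 - k) 0 else 0
      let b := if k < y.length then y.getD (y.length - 1 - k) 0 else 0
      if a > b then some true else if a < b then some false else res)
    none

-- ===== PRECONDITION & SPEC =====
def Spec_bigger_than (x : List Int) (y : List Int) (out : Option Bool) : Prop := out = bigger_than_alt x y
instance (x : List Int) (y : List Int) (out : Option Bool) : Decidable (Spec_bigger_than x y out) := by unfold Spec_bigger_than; infer_instance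

-- ===== CLAIM (what is proved, stated in full; the proofs are below) =====
def Claim_equal_bigger_than : Prop := ∀ (x : List Int) (y : List Int), Dom_bigger_than x y → Spec_bigger_than x y (bigger_than x y)

-- ===== LEMMAS AND PROOFS =====

theorem foldl_ext_mem {α β : Type} (l : List α) (f g : β → α → β) (b : β)
    (h : ∀ a ∈ l, ∀ s, f s a = g s a) : l.foldl f b = l.foldl g b := by
  induction l generalizing b with
  | nil => rfl
  | cons a as ih =>
      simp only [List.foldl_cons]
      rw [h a (by simp)]
      exact ih _ (fun a' ha' s => h a' (by simp [ha']) s)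

theorem pad_ge : ∀ (d : ℕ) (x y : List Int), x.length = y.length + d →
    pyPad x y = (x, List.replicate d 0 ++ y) := by
  intro d
  induction d with
  | zero => intro x y h; rw [pyPad]; simp [h]
  | succ d ih =>
      intro x y h
      rw [pyPad]
      have h1 : x.length ≠ y.length := by omega
      have h2 : x.length > y.length := by omega
      rw [if_pos h1, if_pos h2, ih x (0 :: y) (by simp; omega)]
      simp [List.replicate_succ', List.append_assoc]

theorem pad_lt : ∀ (d : ℕ) (x y : List Int), 0 < d → y.length = x.length + d →
    pyPad x y = (List.replicate d 0 ++ x, y) := by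
  intro d
  induction d with
  | zero => omega
  | succ d ih =>
      intro x y _ h
      rw [pyPad]
      have h1 : x.length ≠ y.length := by omega
      have h2 : ¬ x.length > y.length := by omega
      rw [if_pos h1, if_neg h2]
      rcases Nat.eq_zero_or_pos d with hd | hd
      · subst hd
        rw [pyPad]
        have : (0 :: x).length = y.length := by simp; omega
        simp [this]
      · rw [ih (0 :: x) y hd (by simp; omega)]
        simp [List.replicate_succ', List.append_assoc]

-- the backward fold over two equal-length lists, indexed from the back
def revStep (a b : Int) (r : Option Bool) : Option Bool :=
  if a > b then some true else if a < b then some false else r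

theorem fold_range_cmp : ∀ (a b : List Int), a.length = b.length →
    (List.range a.length).foldl
      (fun r k => revStep (a.getD (a.length - 1 - k) 0) (b.getD (b.length - 1 - k) 0) r)
      none = pyCmp a b := by
  intro a
  induction a with
  | nil => intro b h; cases b <;> simp_all [pyCmp]
  | cons v as ih =>
      intro b h
      cases b with
      | nil => simp at h
      | cons w bs =>
          have hm : as.length = bs.length := by simpa using h
          simp only [List.length_cons, ← hm]
          rw [List.range_succ, List.foldl_append, List.foldl_cons, List.foldl_nil]
          have hin :
              (List.range as.length).foldl
                (fun r k => revStep ((v :: as).getD (as.length + 1 - 1 - k) 0)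
                  ((w :: bs).getD (as.length + 1 - 1 - k) 0) r) none
              = (List.range as.length).foldl
                (fun r k => revStep (as.getD (as.length - 1 - k) 0)
                  (bs.getD (bs.length - 1 - k) 0) r) none := by
            apply foldl_ext_mem
            intro k hk s
            have hk' : k < as.length := by simpa using hk
            have e : as.length + 1 - 1 - k = (as.length - 1 - k) + 1 := by omega
            rw [e, List.getD_cons_succ, List.getD_cons_succ, hm]
          rw [hin, ih bs hm]
          have e0 : as.length + 1 - 1 - as.length = 0 := by omega
          rw [e0, List.getD_cons_zero, List.getD_cons_zero]
          simp only [pyCmp, revStep]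
          rcases lt_trichotomy v w with hc | hc | hc
          · simp [hc, not_lt.mpr (le_of_lt hc)]
          · simp [hc]
          · simp [hc, not_lt.mpr (le_of_lt hc)]

-- B's guarded access equals access into the zero-padded list
theorem alt_eq_fold_padded (x y : List Int) :
    bigger_than_alt x y =
      (List.range (max x.length y.length)).foldl
        (fun r k =>
          revStep ((List.replicate (max x.length y.length - x.length) 0 ++ x).getD
              (max x.length y.length - 1 - k) 0)
            ((List.replicate (max x.length y.length - y.length) 0 ++ y).getD
              (max x.length y.length - 1 - k) 0) r)
        none := by
  unfold bigger_than_alt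
  apply foldl_ext_mem
  intro k hk s
  have hk' : k < max x.length y.length := by simpa using hk
  have key : ∀ (l : List Int), l.length ≤ max x.length y.length →
      (if k < l.length then l.getD (l.length - 1 - k) 0 else 0)
      = (List.replicate (max x.length y.length - l.length) 0 ++ l).getD
          (max x.length y.length - 1 - k) 0 := by
    intro l hl
    by_cases hkl : k < l.length
    · have hge : (List.replicate (max x.length y.length - l.length) (0 : Int)).length
          ≤ max x.length y.length - 1 - k := by simp; omega
      rw [if_pos hkl, List.getD_append_right _ _ _ _ hge]
      have : max x.length y.length - 1 - k
          - (List.replicate (max x.length y.length - l.length) (0 : Int)).length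
          = l.length - 1 - k := by simp; omega
      rw [this]
    · have hlt : max x.length y.length - 1 - k
          < (List.replicate (max x.length y.length - l.length) (0 : Int)).length := by
        simp; omega
      rw [if_neg hkl, List.getD_append _ _ _ _ hlt]
      simp [List.getD]
  simp only [revStep]
  rw [key x (by omega), key y (by omega)]

theorem padded_cmp (x y : List Int) :
    bigger_than x y =
      pyCmp (List.replicate (max x.length y.length - x.length) 0 ++ x)
            (List.replicate (max x.length y.length - y.length) 0 ++ y) := by
  unfold bigger_than
  rcases Nat.lt_or_ge x.length y.length with h | h
  · have hy : max x.length y.length - y.length = 0 := by omega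
    rw [pad_lt (y.length - x.length) x y (by omega) (by omega)]
    have hx : max x.length y.length - x.length = y.length - x.length := by omega
    simp [hx, hy]
  · have hx : max x.length y.length - x.length = 0 := by omega
    rw [pad_ge (x.length - y.length) x y (by omega)]
    have hy : max x.length y.length - y.length = x.length - y.length := by omega
    simp [hx, hy]

-- ===== VERDICT (by name: the statement is the Claim_ definition above) =====
theorem bigger_than_spec : Claim_equal_bigger_than := by
  intro x y _
  unfold Spec_bigger_than
  have hX : (List.replicate (max x.length y.length - x.length) (0 : Int) ++ x).length
      = max x.length y.length := by simp
  have hY : (List.replicate (max x.length y.length - y.length) (0 : Int) ++ y).length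
      = max x.length y.length := by simp
  rw [padded_cmp, ← fold_range_cmp _ _ (by rw [hX, hY]), hX, hY, ← alt_eq_fold_padded]
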